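-- pv_equiv track=rewrite | github.com/mindspore-ai/mindscience | MindSPONGE/applications/research/JT-VAE/src/jtnn_dec.py | have_slots
-- ===== SOURCE A (Python) =====
-- def have_slots(fa_slots, ch_slots):
--     """have slots"""
--     if len(fa_slots) > 2 and len(ch_slots) > 2:
--         return True
--     matches = []
--     for i, s1 in enumerate(fa_slots):
--         a1, c1, h1 = s1
--         for j, s2 in enumerate(ch_slots):
--             a2, c2, h2 = s2
--             if a1 == a2 and c1 == c2 and (a1 != "C" or h1 + h2 >= 4):
--                 matches.append((i, j))
--
--     if not matches:
--         return False
--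
--     fa_match, ch_match = zip(*matches)
--     if len(set(fa_match)) == 1 and 1 < len(fa_slots) <= 2:
--         fa_slots.pop(fa_match[0])
--     if len(set(ch_match)) == 1 and 1 < len(ch_slots) <= 2:
--         ch_slots.pop(ch_match[0])
--
--     return True
-- ===== SOURCE B (Python) =====
-- def have_slots(fa_slots, ch_slots):
--     """have slots"""
--     if len(fa_slots) > 2 and len(ch_slots) > 2:
--         return True
--
--     def compat(s1, s2):
--         a1, c1, h1 = s1
--         a2, c2, h2 = s2
--         return a1 == a2 and c1 == c2 and (a1 != "C" or h1 + h2 >= 4)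
--
--     matched_fa = [i for i, s1 in enumerate(fa_slots)
--                   if any(compat(s1, s2) for s2 in ch_slots)]
--     if not matched_fa:
--         return False
--     matched_ch = [j for j, s2 in enumerate(ch_slots)
--                   if any(compat(s1, s2) for s1 in fa_slots)]
--
--     if len(matched_fa) == 1 and 1 < len(fa_slots) <= 2:
--         fa_slots.pop(matched_fa[0])
--     if len(matched_ch) == 1 and 1 < len(ch_slots) <= 2:
--         ch_slots.pop(matched_ch[0])
--
--     return True
-- ===== Notes on version B (the rewrite author's own statement) =====
-- stated objective: simpler
-- what changed: Replaces the nested loop that materialises every compatible (i,j) pair plus zip/set post-processing by two independent comprehensions collecting the matched indices of each side directly via any(), so no pair list, zip or set is built.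
import Mathlib
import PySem

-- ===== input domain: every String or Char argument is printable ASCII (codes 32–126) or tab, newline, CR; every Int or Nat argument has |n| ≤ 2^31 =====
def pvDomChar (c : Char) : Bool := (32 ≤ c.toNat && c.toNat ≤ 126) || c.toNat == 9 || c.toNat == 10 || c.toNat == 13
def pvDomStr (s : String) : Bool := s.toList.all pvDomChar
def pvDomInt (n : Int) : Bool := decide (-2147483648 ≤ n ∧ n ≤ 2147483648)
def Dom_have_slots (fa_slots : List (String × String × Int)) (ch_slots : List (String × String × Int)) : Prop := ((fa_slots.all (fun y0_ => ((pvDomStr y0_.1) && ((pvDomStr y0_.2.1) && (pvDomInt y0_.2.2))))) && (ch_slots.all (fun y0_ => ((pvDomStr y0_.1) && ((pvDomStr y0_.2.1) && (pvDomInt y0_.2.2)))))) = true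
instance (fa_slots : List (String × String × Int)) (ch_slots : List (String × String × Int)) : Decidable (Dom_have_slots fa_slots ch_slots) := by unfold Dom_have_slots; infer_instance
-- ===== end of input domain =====

-- B collects the matched indices of each side directly with two any()-comprehensions instead of
-- building the (i,j) pair list and zip/set post-processing; objective: simpler.
-- Both Pythons mutate fa_slots/ch_slots in place identically (the same pops); the equivalence
-- proved here is about the RETURN value (the pops never affect it, so the ports elide them).

-- ===== PORT A =====
def have_slots (fa_slots : List (String × String × Int)) (ch_slots : List (String × String × Int)) : Bool :=
  if fa_slots.length > 2 && ch_slots.length > 2 then true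
  else
    -- nested enumerate loops appending every compatible (i, j) pair
    let pairs_ : List (Int × Int) :=
      (PySem.List.enumerate fa_slots).foldl (fun acc p =>
        (PySem.List.enumerate ch_slots).foldl (fun acc2 q =>
          if p.2.1 == q.2.1 && p.2.2.1 == q.2.2.1 && (!(p.2.1 == "C") || p.2.2.2 + q.2.2.2 ≥ 4)
          then acc2 ++ [(p.1, q.1)] else acc2) acc) []
    if pairs_.isEmpty then false
    else
      -- fa_match/ch_match and the two pops only mutate the argument lists; the return is True
      true

-- ===== PORT B =====
def pvCompat (s1 s2 : String × String × Int) : Bool :=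
  s1.1 == s2.1 && s1.2.1 == s2.2.1 && (!(s1.1 == "C") || s1.2.2 + s2.2.2 ≥ 4)

def have_slots_alt (fa_slots : List (String × String × Int)) (ch_slots : List (String × String × Int)) : Bool :=
  if fa_slots.length > 2 && ch_slots.length > 2 then true
  else
    let matched_fa : List Int :=
      ((PySem.List.enumerate fa_slots).filter (fun p => ch_slots.any (fun s2 => pvCompat p.2 s2))).map (·.1)
    if matched_fa.isEmpty then false
    else
      -- matched_ch and the two pops only mutate the argument lists; the return is True
      true

-- ===== PRECONDITION & SPEC =====
def Spec_have_slots (fa_slots : List (String × String × Int)) (ch_slots : List (String × String × Int)) (out : Bool) : Prop := out = have_slots_alt fa_slots ch_slots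
instance (fa_slots : List (String × String × Int)) (ch_slots : List (String × String × Int)) (out : Bool) : Decidable (Spec_have_slots fa_slots ch_slots out) := by unfold Spec_have_slots; infer_instance

-- ===== CLAIM (what is proved, stated in full; the proofs are below) =====
def Claim_equal_have_slots : Prop := ∀ (fa_slots : List (String × String × Int)) (ch_slots : List (String × String × Int)), Dom_have_slots fa_slots ch_slots → Spec_have_slots fa_slots ch_slots (have_slots fa_slots ch_slots)

-- ===== LEMMAS AND PROOFS =====

-- A's pair list is empty exactly when B's index list is empty
theorem matches_empty_iff (fa_slots ch_slots : List (String × String × Int)) :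
    ((PySem.List.enumerate fa_slots).foldl (fun acc p =>
        (PySem.List.enumerate ch_slots).foldl (fun acc2 q =>
          if p.2.1 == q.2.1 && p.2.2.1 == q.2.2.1 && (!(p.2.1 == "C") || p.2.2.2 + q.2.2.2 ≥ 4)
          then acc2 ++ [((p.1 : Int), (q.1 : Int))] else acc2) acc) ([] : List (Int × Int))).isEmpty
    = (((PySem.List.enumerate fa_slots).filter (fun p => ch_slots.any (fun s2 => pvCompat p.2 s2))).map (·.1)).isEmpty := by
  have hinner : ∀ (p : Int × String × String × Int) (acc : List (Int × Int)),
      (PySem.List.enumerate ch_slots).foldl (fun acc2 q =>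
        if p.2.1 == q.2.1 && p.2.2.1 == q.2.2.1 && (!(p.2.1 == "C") || p.2.2.2 + q.2.2.2 ≥ 4)
        then acc2 ++ [(p.1, q.1)] else acc2) acc
      = acc ++ ((PySem.List.enumerate ch_slots).filter (fun q => pvCompat p.2 q.2)).map (fun q => (p.1, q.1)) := by
    intro p acc
    exact PySem.List.foldl_append_if _ _ _ _
  have h1 := PySem.List.foldl_congr_mem'
      (l := PySem.List.enumerate fa_slots) (init := ([] : List (Int × Int)))
      (f := fun acc p =>
        (PySem.List.enumerate ch_slots).foldl (fun acc2 q =>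
          if p.2.1 == q.2.1 && p.2.2.1 == q.2.2.1 && (!(p.2.1 == "C") || p.2.2.2 + q.2.2.2 ≥ 4)
          then acc2 ++ [(p.1, q.1)] else acc2) acc)
      (g := fun acc p =>
        acc ++ ((PySem.List.enumerate ch_slots).filter (fun q => pvCompat p.2 q.2)).map (fun q => (p.1, q.1)))
      (fun p _ acc => hinner p acc)
  rw [h1, PySem.List.foldl_append_eq_flatMap]
  rw [Bool.eq_iff_iff]
  simp only [List.nil_append, List.isEmpty_iff, List.flatMap_eq_nil_iff, List.map_eq_nil_iff,
    List.filter_eq_nil_iff, List.any_eq_true, not_exists, not_and, pvCompat]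
  constructor
  · intro h p hp s2 hs2
    rcases List.mem_iff_get.mp hs2 with ⟨k, hk⟩
    have hq : ((k : Int), s2) ∈ PySem.List.enumerate ch_slots := by
      rw [PySem.List.mem_enumerate_iff]
      exact ⟨k, k.isLt, by simp [← hk, List.get_eq_getElem]⟩
    exact h p hp ((k : Int), s2) hq
  · intro h p hp q hq
    have hmem : q.2 ∈ ch_slots := by
      rw [PySem.List.mem_enumerate_iff] at hq
      obtain ⟨k, hk, rfl⟩ := hq
      simp
    exact h p hp q.2 hmem

-- ===== VERDICT (by name: the statement is the Claim_ definition above) =====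
theorem have_slots_spec : Claim_equal_have_slots := by
  intro fa ch _
  unfold Spec_have_slots have_slots have_slots_alt
  by_cases hg : (fa.length > 2 && ch.length > 2) = true
  · simp [hg]
  · simp only [hg]
    rw [matches_empty_iff fa ch]
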